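-- pv_equiv track=rewrite | github.com/xpqz/aoc-17 | day9.py | ffwd
-- ===== SOURCE A (Python) =====
-- def ffwd(stream, i):
--     pos = i+1
--     removed = 0
--     while pos < len(stream):
--         c = stream[pos]
--         if c == "!":
--             pos += 2
--             continue
--         if c == ">":
--             return (pos, removed)
--
--         pos += 1
--         removed += 1
-- ===== SOURCE B (Python) =====
-- def ffwd(stream, i):
--     pos = i + 1
--     removed = 0
--     n = len(stream)
--     while pos < n:
--         gt = stream.find(">", pos)
--         bang = stream.find("!", pos)
--         if gt != -1 and (bang == -1 or gt < bang):
--             return (gt, removed + (gt - pos))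
--         if bang == -1:
--             return None
--         removed += bang - pos
--         pos = bang + 2
-- ===== Notes on version B (the rewrite author's own statement) =====
-- stated objective: faster
-- what changed: Replaced A's char-by-char scan with a jump scan: str.find (C-level) locates the next '>' and the next '!', the skipped plain characters are counted arithmetically from the index gap, and the loop jumps straight past each escaped pair; Pre_ excludes negative start positions, where A either raises IndexError or wraps around via Python negative indexing and rescans the string from the start.
-- outside the precondition, e.g. on ffwd('ab>', -3): A returns (-1, 1), B returns (2, 4)
import Mathlib
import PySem

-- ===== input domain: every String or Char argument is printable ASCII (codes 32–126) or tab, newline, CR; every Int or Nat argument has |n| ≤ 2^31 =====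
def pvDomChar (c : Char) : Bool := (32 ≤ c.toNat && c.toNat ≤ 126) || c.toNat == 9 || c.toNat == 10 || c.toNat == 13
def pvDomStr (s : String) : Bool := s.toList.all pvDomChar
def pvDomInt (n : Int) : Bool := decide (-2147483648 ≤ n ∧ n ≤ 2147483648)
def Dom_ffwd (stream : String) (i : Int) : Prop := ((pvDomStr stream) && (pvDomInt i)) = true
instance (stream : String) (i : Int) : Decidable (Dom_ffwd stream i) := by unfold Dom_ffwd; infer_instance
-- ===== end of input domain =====

-- B replaces A's char-by-char scan with a jump scan: str.find locates the next '>' and the next '!'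
-- and the skipped plain chars are counted by arithmetic on the gap (objective: faster by constant factor, measured).


-- ===== PORT A =====
-- literal port of A's while-loop: on '!' jump pos by 2, on '>' return, else count.
-- 'fuel' is a totality guard only: pos grows by ≥ 1 per step, so the initial fuel
-- (length - start).toNat + 1 is never exhausted before the loop's own exit.
def ffwdLoopA (s : List Char) : Nat → Int → Int → Option (Int × Int)
  | 0, _, _ => none
  | fuel + 1, pos, removed =>
    if pos < (s.length : Int) then
      match PySem.List.pyGet? s pos with
      | none => none    -- IndexError (outside Pre_)
      | some c =>
        if c == '!' then ffwdLoopA s fuel (pos + 2) removed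
        else if c == '>' then some (pos, removed)
        else ffwdLoopA s fuel (pos + 1) (removed + 1)
    else none

def ffwd (stream : String) (i : Int) : Option (Int × Int) :=
  ffwdLoopA stream.toList (((stream.toList.length : Int) - (i + 1)).toNat + 1) (i + 1) 0

-- ===== PORT B =====
-- literal port of B's while-loop: find the next '>' and '!', count the gap arithmetically,
-- return at the '>' or jump past the escaped pair ('fuel' is the same totality guard).
def ffwdLoopB (s : List Char) : Nat → Int → Int → Option (Int × Int)
  | 0, _, _ => none
  | fuel + 1, pos, removed =>
    if pos < (s.length : Int) then
      let gt := PySem.Chars.findFrom s ['>'] pos none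
      let bang := PySem.Chars.findFrom s ['!'] pos none
      if gt ≠ -1 ∧ (bang = -1 ∨ gt < bang) then some (gt, removed + (gt - pos))
      else if bang = -1 then none
      else ffwdLoopB s fuel (bang + 2) (removed + (bang - pos))
    else none

def ffwd_alt (stream : String) (i : Int) : Option (Int × Int) :=
  ffwdLoopB stream.toList (((stream.toList.length : Int) - (i + 1)).toNat + 1) (i + 1) 0

-- ===== PRECONDITION & SPEC =====
-- Pre_ excludes negative start positions i+1 < 0: for i+1 < -len(stream) (len > 0) A raises
-- IndexError, and for -len ≤ i+1 < 0 A's stream[pos] wraps around by Python negative indexing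
-- and rescans the string from the start — an unspecified corner no caller relies on — while
-- B's find clamps the start; the function is only meant for nonnegative positions.
def Pre_ffwd (stream : String) (i : Int) : Prop := 0 ≤ i + 1
instance (stream : String) (i : Int) : Decidable (Pre_ffwd stream i) := by
  unfold Pre_ffwd; infer_instance

def pvWitness_ffwd : String × Int := ("<!!a>", 0)

def Spec_ffwd (stream : String) (i : Int) (out : Option (Int × Int)) : Prop := out = ffwd_alt stream i
instance (stream : String) (i : Int) (out : Option (Int × Int)) : Decidable (Spec_ffwd stream i out) := by unfold Spec_ffwd; infer_instance

-- ===== CLAIM (what is proved, stated in full; the proofs are below) =====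
def Claim_equal_ffwd : Prop := ∀ (stream : String) (i : Int), Dom_ffwd stream i → Pre_ffwd stream i → Spec_ffwd stream i (ffwd stream i)

-- ===== LEMMAS AND PROOFS =====

-- a singleton is a prefix of 'drop j s' iff s[j]? is that char
lemma single_prefix_drop (c : Char) (s : List Char) (j : Nat) :
    [c] <+: s.drop j ↔ s[j]? = some c := by
  rw [show s[j]? = (s.drop j)[0]? by simp [List.getElem?_drop]]
  constructor
  · rintro ⟨t, ht⟩; rw [← ht]; rfl
  · intro h
    cases hd : s.drop j with
    | nil => rw [hd] at h; simp at h
    | cons a t => rw [hd] at h; simp at h; exact ⟨t, by simp [h]⟩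

-- a char sitting at index j ≥ k is an infix of 'drop k s'
lemma single_infix_drop (c : Char) (s : List Char) (k j : Nat) (hkj : k ≤ j)
    (h : s[j]? = some c) : [c] <:+: s.drop k := by
  have h1 : [c] <+: s.drop j := (single_prefix_drop c s j).mpr h
  have h2 : s.drop j <:+ s.drop k := by
    rw [show j = k + (j - k) by omega, ← List.drop_drop]
    exact List.drop_suffix _ _
  exact h1.isInfix.trans h2.isInfix

-- A's loop does not read its fuel as long as the guard value is large enough
lemma loopA_fuel (s : List Char) :
    ∀ (f₁ f₂ : Nat) (pos removed : Int),
      ((s.length : Int) - pos).toNat < f₁ → ((s.length : Int) - pos).toNat < f₂ →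
      ffwdLoopA s f₁ pos removed = ffwdLoopA s f₂ pos removed := by
  intro f₁
  induction f₁ with
  | zero => intro f₂ pos removed h1 _; omega
  | succ f ih =>
    intro f₂ pos removed h1 h2
    cases f₂ with
    | zero => omega
    | succ g =>
      rw [ffwdLoopA, ffwdLoopA]
      by_cases hlt : pos < (s.length : Int)
      · rw [if_pos hlt, if_pos hlt]
        cases PySem.List.pyGet? s pos with
        | none => rfl
        | some c =>
          by_cases hc1 : (c == '!') = true
          · simp only [hc1, if_true]
            exact ih g (pos + 2) removed (by omega) (by omega)
          · by_cases hc2 : (c == '>') = true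
            · simp only [hc1, hc2, Bool.false_eq_true, if_false, if_true]
            · simp only [hc1, hc2, Bool.false_eq_true, if_false]
              exact ih g (pos + 1) (removed + 1) (by omega) (by omega)
      · rw [if_neg hlt, if_neg hlt]

-- A's loop steps over a block of plain characters, counting each one
lemma loopA_run (s : List Char) :
    ∀ (fuel : Nat) (pos q removed : Int),
      0 ≤ pos → pos ≤ q → q ≤ (s.length : Int) →
      ((s.length : Int) - pos).toNat < fuel →
      (∀ j : Nat, pos ≤ (j : Int) → (j : Int) < q → s[j]? ≠ some '!' ∧ s[j]? ≠ some '>') →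
      ffwdLoopA s fuel pos removed = ffwdLoopA s fuel q (removed + (q - pos)) := by
  intro fuel
  induction fuel with
  | zero => intro pos q removed _ _ _ h _; omega
  | succ f ih =>
    intro pos q removed h0 hpq hq hfuel hmid
    by_cases hlt : pos < q
    · have hjn : pos = ((pos.toNat : Nat) : Int) := by omega
      have hget : PySem.List.pyGet? s pos = s[pos.toNat]? := by
        conv_lhs => rw [hjn]
        rw [PySem.List.pyGet?_natCast]
      have hchar := hmid pos.toNat (by omega) (by omega)
      rw [ffwdLoopA]
      have hplen : pos < (s.length : Int) := by omega
      rw [if_pos hplen]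
      cases hc : s[pos.toNat]? with
      | none =>
        exfalso
        have : pos.toNat < s.length := by omega
        simp [List.getElem?_eq_getElem this] at hc
      | some c =>
        rw [hget, hc]
        have h1 : ¬ (c == '!') = true := by
          simp; rintro rfl; exact hchar.1 hc
        have h2 : ¬ (c == '>') = true := by
          simp; rintro rfl; exact hchar.2 hc
        have hstep := ih (pos + 1) q (removed + 1) (by omega) (by omega) hq (by omega)
          (fun j hj1 hj2 => hmid j (by omega) hj2)
        simp only [h1, h2, Bool.false_eq_true, if_false]
        rw [hstep, loopA_fuel s f (f + 1) q (removed + 1 + (q - (pos + 1))) (by omega) (by omega)]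
        ring_nf
    · have : q = pos := by omega
      subst this; norm_num
-- the two loops agree for nonnegative pos and sufficient fuel
lemma loopA_eq_loopB (s : List Char) :
    ∀ (fuel : Nat) (pos removed : Int),
      0 ≤ pos → ((s.length : Int) - pos).toNat < fuel →
      ffwdLoopA s fuel pos removed = ffwdLoopB s fuel pos removed := by
  intro fuel
  induction fuel with
  | zero => intro pos removed _ h; omega
  | succ f ih =>
    intro pos removed h0 hfuel
    rw [ffwdLoopB]
    by_cases hlt : pos < (s.length : Int)
    · rw [if_pos hlt]
      have hkn : pos = ((pos.toNat : Nat) : Int) := by omega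
      have hkle : pos.toNat ≤ s.length := by omega
      set gt := PySem.Chars.findFrom s ['>'] pos none with hgt
      set bang := PySem.Chars.findFrom s ['!'] pos none with hbang
      have hgtEq : gt = PySem.Chars.findFrom s ['>'] ((pos.toNat : Nat) : Int) none := by
        rw [hgt, ← hkn]
      have hbangEq : bang = PySem.Chars.findFrom s ['!'] ((pos.toNat : Nat) : Int) none := by
        rw [hbang, ← hkn]
      by_cases hg : gt ≠ -1 ∧ (bang = -1 ∨ gt < bang)
      · rw [if_pos hg]
        obtain ⟨hgne, hbor⟩ := hg
        have hspec := PySem.Chars.findFrom_natCast_spec s ['>'] pos.toNat hkle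
          (by rw [← hgtEq]; exact hgne)
        rw [← hgtEq] at hspec
        obtain ⟨hgge, hgpre, hgmin⟩ := hspec
        have hgchar : s[gt.toNat]? = some '>' := (single_prefix_drop _ _ _).mp hgpre
        have hgin : gt.toNat < s.length := by
          by_contra hcon
          rw [List.getElem?_eq_none_iff.mpr (by omega)] at hgchar
          simp at hgchar
        -- no '!' and no '>' strictly between pos and gt
        have hmid : ∀ j : Nat, pos ≤ (j : Int) → (j : Int) < gt →
            s[j]? ≠ some '!' ∧ s[j]? ≠ some '>' := by
          intro j hj1 hj2
          constructor
          · intro hc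
            rcases hbor with hb1 | hb2
            · exact (PySem.Chars.findFrom_natCast_eq_neg_one_iff s ['!'] pos.toNat hkle).mp
                (by rw [← hbangEq]; exact hb1)
                (single_infix_drop '!' s pos.toNat j (by omega) hc)
            · have hbspec := PySem.Chars.findFrom_natCast_spec s ['!'] pos.toNat hkle
                (by rw [← hbangEq]; omega)
              rw [← hbangEq] at hbspec
              exact hbspec.2.2 j (by omega) (by omega) ((single_prefix_drop _ _ _).mpr hc)
          · intro hc
            exact hgmin j (by omega) (by omega) ((single_prefix_drop _ _ _).mpr hc)
        rw [loopA_run s (f + 1) pos gt removed h0 (by omega) (by omega) hfuel hmid]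
        rw [ffwdLoopA, if_pos (by omega : gt < (s.length : Int))]
        have hpg : PySem.List.pyGet? s gt = s[gt.toNat]? := by
          conv_lhs => rw [show gt = ((gt.toNat : Nat) : Int) by omega]
          rw [PySem.List.pyGet?_natCast]
        rw [hpg, hgchar]
        simp only [show ('>' == '!') = false by decide, show ('>' == '>') = true by decide,
          Bool.false_eq_true, if_false, if_true]
      · rw [if_neg hg]
        push Not at hg
        by_cases hb : bang = -1
        · -- then gt = -1 too: nothing special left, A counts to the end and returns none
          rw [if_pos hb]
          have hgne : gt = -1 := by
            by_contra hcon
            exact (hg hcon).1 hb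
          have hnog := (PySem.Chars.findFrom_natCast_eq_neg_one_iff s ['>'] pos.toNat hkle).mp
            (by rw [← hgtEq]; exact hgne)
          have hnob := (PySem.Chars.findFrom_natCast_eq_neg_one_iff s ['!'] pos.toNat hkle).mp
            (by rw [← hbangEq]; exact hb)
          have hmid : ∀ j : Nat, pos ≤ (j : Int) → (j : Int) < (s.length : Int) →
              s[j]? ≠ some '!' ∧ s[j]? ≠ some '>' := by
            intro j hj1 hj2
            exact ⟨fun hc => hnob (single_infix_drop '!' s pos.toNat j (by omega) hc),
                   fun hc => hnog (single_infix_drop '>' s pos.toNat j (by omega) hc)⟩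
          rw [loopA_run s (f + 1) pos (s.length : Int) removed h0 (by omega) (by omega) hfuel hmid]
          rw [ffwdLoopA]; norm_num
        · -- '!' comes first: A counts up to bang, skips the pair, loops on from bang+2
          rw [if_neg hb]
          have hbspec := PySem.Chars.findFrom_natCast_spec s ['!'] pos.toNat hkle
            (by rw [← hbangEq]; exact hb)
          rw [← hbangEq] at hbspec
          obtain ⟨hbge, hbpre, hbmin⟩ := hbspec
          have hbchar : s[bang.toNat]? = some '!' := (single_prefix_drop _ _ _).mp hbpre
          have hbin : bang.toNat < s.length := by
            by_contra hcon
            rw [List.getElem?_eq_none_iff.mpr (by omega)] at hbchar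
            simp at hbchar
          have hble : bang ≤ gt ∨ gt = -1 := by
            by_cases hgne : gt = -1
            · right; exact hgne
            · left; have := (hg hgne).2; omega
          have hmid : ∀ j : Nat, pos ≤ (j : Int) → (j : Int) < bang →
              s[j]? ≠ some '!' ∧ s[j]? ≠ some '>' := by
            intro j hj1 hj2
            constructor
            · intro hc
              exact hbmin j (by omega) (by omega) ((single_prefix_drop _ _ _).mpr hc)
            · intro hc
              rcases hble with h1 | h2
              · have hgspec := PySem.Chars.findFrom_natCast_spec s ['>'] pos.toNat hkle
                  (by rw [← hgtEq]; omega)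
                rw [← hgtEq] at hgspec
                exact hgspec.2.2 j (by omega) (by omega) ((single_prefix_drop _ _ _).mpr hc)
              · exact (PySem.Chars.findFrom_natCast_eq_neg_one_iff s ['>'] pos.toNat hkle).mp
                  (by rw [← hgtEq]; exact h2)
                  (single_infix_drop '>' s pos.toNat j (by omega) hc)
          rw [loopA_run s (f + 1) pos bang removed h0 (by omega) (by omega) hfuel hmid]
          rw [ffwdLoopA, if_pos (by omega : bang < (s.length : Int))]
          have hpb : PySem.List.pyGet? s bang = s[bang.toNat]? := by
            conv_lhs => rw [show bang = ((bang.toNat : Nat) : Int) by omega]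
            rw [PySem.List.pyGet?_natCast]
          rw [hpb, hbchar]
          simp only [show ('!' == '!') = true by decide, if_true]
          exact ih (bang + 2) (removed + (bang - pos)) (by omega) (by omega)
    · rw [if_neg hlt, ffwdLoopA, if_neg hlt]

-- ===== VERDICT (by name: the statement is the Claim_ definition above) =====
theorem ffwd_spec : Claim_equal_ffwd := by
  intro stream i _ hpre
  unfold Spec_ffwd ffwd ffwd_alt
  exact loopA_eq_loopB stream.toList _ (i + 1) 0 hpre (by omega)
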